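-- pv_equiv track=rewrite | github.com/TimeB1729/codeforces | educational round 179 (div 2)/pA.py | ourfunc
-- ===== SOURCE A (Python) =====
-- def ourfunc(t, test_cases):
--     results=[]
--     for case in test_cases:
--         x=case
--         arr=[0,0,0]
--         count=0
--         while min(arr)<x:
--             del(arr[0])
--             new_min = arr[0]
--             arr.append(2*new_min + 1)
--             # Increment the count
--             count += 1
--             arr.sort()
--
--         results.append(count)
--
--     return results
-- ===== SOURCE B (Python) =====
-- def ourfunc(t, test_cases):
--     # Closed form: the loop's min after 2k+1 steps is 2^k-1, so the answer for
--     # x >= 1 is 2*bit_length(x)+1 (smallest k with 2^k-1 >= x is bit_length(x)); 0 otherwise.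
--     return [0 if x <= 0 else 2 * x.bit_length() + 1 for x in test_cases]
-- ===== Notes on version B (the rewrite author's own statement) =====
-- stated objective: faster
-- what changed: Replaces the per-case simulation loop (delete-min/append/sort until min reaches x) by the closed form 0 if x<=0 else 2*x.bit_length()+1, since the loop's min after 2k+1 steps is 2^k-1.
import Mathlib
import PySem

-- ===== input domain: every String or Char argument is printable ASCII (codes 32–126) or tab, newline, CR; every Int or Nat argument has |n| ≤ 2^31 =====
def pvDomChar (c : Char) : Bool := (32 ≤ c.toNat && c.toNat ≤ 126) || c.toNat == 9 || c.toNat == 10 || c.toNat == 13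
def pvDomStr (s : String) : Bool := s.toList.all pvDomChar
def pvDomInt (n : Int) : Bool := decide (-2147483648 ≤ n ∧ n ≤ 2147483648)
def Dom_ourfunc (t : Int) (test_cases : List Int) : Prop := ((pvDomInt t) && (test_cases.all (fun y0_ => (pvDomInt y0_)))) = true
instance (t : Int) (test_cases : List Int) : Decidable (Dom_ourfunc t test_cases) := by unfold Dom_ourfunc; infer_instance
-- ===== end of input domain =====

-- B replaces A's per-case simulation loop (delete-min/append/sort until min ≥ x) by the
-- closed form 0 if x ≤ 0 else 2*bit_length(x)+1; objective: faster (no loop per case).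

-- ===== PORT A =====
-- A's while loop, made total with fuel (100 suffices on Dom: at most 2*32+1 = 65 iterations);
-- each iteration is A's body step for step: min(arr), del arr[0], arr[0], append 2*m+1, sort.
def ourfuncLoop (x : Int) : Nat → List Int → Int → Int
  | 0, _, count => count
  | fuel+1, arr, count =>
    if (PySem.List.min? arr (fun y => y)).getD 0 < x then
      let arr1 := arr.drop 1                                  -- del(arr[0])
      let new_min := (PySem.List.pyGet? arr1 0).getD 0        -- arr[0] (arr is never empty here)
      let arr2 := arr1 ++ [2 * new_min + 1]                   -- arr.append(2*new_min + 1)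
      let arr3 := PySem.List.sorted arr2 (fun y => y)         -- arr.sort()
      ourfuncLoop x fuel arr3 (count + 1)
    else count

def ourfunc (t : Int) (test_cases : List Int) : List Int :=
  test_cases.foldl (fun results case => results ++ [ourfuncLoop case 100 [0, 0, 0] 0]) []

-- ===== PORT B =====
def ourfunc_alt (t : Int) (test_cases : List Int) : List Int :=
  test_cases.map (fun x => if x ≤ 0 then 0 else 2 * (PySem.Int.bitLength x : Int) + 1)

-- ===== PRECONDITION & SPEC =====
def Spec_ourfunc (t : Int) (test_cases : List Int) (out : List Int) : Prop := out = ourfunc_alt t test_cases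
instance (t : Int) (test_cases : List Int) (out : List Int) : Decidable (Spec_ourfunc t test_cases out) := by unfold Spec_ourfunc; infer_instance

-- ===== CLAIM (what is proved, stated in full; the proofs are below) =====
def Claim_equal_ourfunc : Prop := ∀ (t : Int) (test_cases : List Int), Dom_ourfunc t test_cases → Spec_ourfunc t test_cases (ourfunc t test_cases)

-- ===== LEMMAS AND PROOFS =====

-- One unfolding of A's loop on a 3-element array, with the body's list operations evaluated.
lemma ourfuncLoop_step (x : Int) (f : Nat) (a b c cnt : Int) :
    ourfuncLoop x (f + 1) [a, b, c] cnt =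
      if min (min a b) c < x then
        ourfuncLoop x f (PySem.List.sorted [b, c, 2 * b + 1] (fun y => y)) (cnt + 1)
      else cnt := by
  simp [ourfuncLoop, PySem.List.min?_id_cons, PySem.List.pyGet?, PySem.List.pyIdx?]

lemma bitLength_eq_of_bounds (k : Nat) (x : Int) (h1 : (2 : Int) ^ k ≤ x) (h2 : x < 2 ^ (k + 1)) :
    PySem.Int.bitLength x = k + 1 := by
  have hx0 : 0 < x := lt_of_lt_of_le (by positivity) h1
  have hu := PySem.Int.lt_two_pow_bitLength x
  have hl := PySem.Int.two_pow_bitLength_le x (by omega)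
  have hn : (x.natAbs : Int) = x := Int.natAbs_of_nonneg hx0.le
  set L := PySem.Int.bitLength x with hL
  have h1' : 2 ^ k ≤ x.natAbs := by exact_mod_cast hn ▸ h1
  have h2' : x.natAbs < 2 ^ (k + 1) := by exact_mod_cast hn ▸ h2
  have hkL : k < L := by
    have : (2 : Nat) ^ k < 2 ^ L := lt_of_le_of_lt h1' hu
    exact (Nat.pow_lt_pow_iff_right (by norm_num)).mp this
  have hLk : L - 1 < k + 1 := by
    have : (2 : Nat) ^ (L - 1) < 2 ^ (k + 1) := lt_of_le_of_lt hl h2'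
    exact (Nat.pow_lt_pow_iff_right (by norm_num)).mp this
  omega

-- Invariant: from the sorted state [2^k-1, 2^k-1, 2^(k+1)-1] reached after 2k+1 iterations,
-- A's loop adds 2*(bit_length x - k) to the count (and stops at once if 2^k-1 ≥ x).
lemma ourfuncLoop_key (d : Nat) : ∀ (k fuel : Nat) (c x : Int),
    x ≤ 2 ^ (k + d) - 1 → 2 * d ≤ fuel →
    ourfuncLoop x fuel [2 ^ k - 1, 2 ^ k - 1, 2 ^ (k + 1) - 1] c =
      if 2 ^ k - 1 < x then c + 2 * ((PySem.Int.bitLength x : Int) - (k : Int)) else c := by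
  induction d with
  | zero =>
    intro k fuel c x hx _
    have hc : ¬ (2 : Int) ^ k - 1 < x := by simpa using not_lt.mpr (by omega : x ≤ 2 ^ k - 1)
    rw [if_neg hc]
    cases fuel with
    | zero => rfl
    | succ f =>
      rw [ourfuncLoop_step, if_neg]
      have hab : (2 : Int) ^ k - 1 ≤ 2 ^ (k + 1) - 1 := by
        have : (2 : Int) ^ k ≤ 2 ^ (k + 1) := pow_le_pow_right₀ (by norm_num) (by omega)
        omega
      simp [min_eq_left hab]
      omega
  | succ d ih =>
    intro k fuel c x hx hf
    by_cases hc : (2 : Int) ^ k - 1 < x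
    · obtain ⟨f, rfl⟩ : ∃ f, fuel = f + 2 := ⟨fuel - 2, by omega⟩
      have hab : (2 : Int) ^ k - 1 ≤ 2 ^ (k + 1) - 1 := by
        have : (2 : Int) ^ k ≤ 2 ^ (k + 1) := pow_le_pow_right₀ (by norm_num) (by omega)
        omega
      have hbc : (2 : Int) ^ (k + 1) - 1 ≤ 2 ^ (k + 2) - 1 := by
        have : (2 : Int) ^ (k + 1) ≤ 2 ^ (k + 2) := pow_le_pow_right₀ (by norm_num) (by omega)
        omega
      have hdup : 2 * ((2 : Int) ^ k - 1) + 1 = 2 ^ (k + 1) - 1 := by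
        rw [pow_succ]; ring
      have hdup2 : 2 * ((2 : Int) ^ (k + 1) - 1) + 1 = 2 ^ (k + 2) - 1 := by
        rw [pow_succ 2 (k + 1)]; ring
      rw [show f + 2 = (f + 1) + 1 from rfl, ourfuncLoop_step,
          if_pos (by simpa [min_eq_left hab, min_self] using hc), hdup,
          PySem.List.sorted_eq_self_of_pairwise _ _ (by simp; exact pow_le_pow_right₀ one_le_two (by omega)),
          ourfuncLoop_step,
          if_pos (by simpa [min_eq_left hab, min_self, min_eq_left (le_refl ((2:Int)^(k+1)-1))] using hc),
          hdup2,
          PySem.List.sorted_eq_self_of_pairwise _ _ (by simp; exact pow_le_pow_right₀ one_le_two (by omega))]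
      rw [show (2 : Int) ^ (k + 1 + 1) = 2 ^ (k + 2) from rfl] at *
      rw [ih (k + 1) f (c + 1 + 1) x (by rw [show k + 1 + d = k + (d + 1) from by omega]; exact hx) (by omega)]
      rw [if_pos hc]
      by_cases h2 : (2 : Int) ^ (k + 1) - 1 < x
      · rw [if_pos h2]; push_cast; ring
      · rw [if_neg h2]
        have hbl : PySem.Int.bitLength x = k + 1 :=
          bitLength_eq_of_bounds k x (by omega) (by omega)
        rw [hbl]; push_cast; ring
    · rw [if_neg hc]
      cases fuel with
      | zero => rfl
      | succ f =>
        rw [ourfuncLoop_step, if_neg]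
        have hab : (2 : Int) ^ k - 1 ≤ 2 ^ (k + 1) - 1 := by
          have : (2 : Int) ^ k ≤ 2 ^ (k + 1) := pow_le_pow_right₀ (by norm_num) (by omega)
          omega
        simpa [min_eq_left hab, min_self] using hc

-- The first three iterations take [0,0,0] to [1,1,3] (= the k = 1 state) when x ≥ 1.
lemma ourfuncLoop_init (x : Int) (hx : 0 < x) :
    ourfuncLoop x 100 [0, 0, 0] 0 = ourfuncLoop x 97 [1, 1, 3] 3 := by
  rw [show (100 : Nat) = 99 + 1 from rfl, ourfuncLoop_step,
      if_pos (by simpa using hx),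
      show PySem.List.sorted [(0:Int), 0, 2 * 0 + 1] (fun y => y) = [0, 0, 1] from by decide,
      show (99 : Nat) = 98 + 1 from rfl, ourfuncLoop_step,
      if_pos (by simpa using hx),
      show PySem.List.sorted [(0:Int), 1, 2 * 0 + 1] (fun y => y) = [0, 1, 1] from by decide,
      show (98 : Nat) = 97 + 1 from rfl, ourfuncLoop_step,
      if_pos (by simpa using hx),
      show PySem.List.sorted [(1:Int), 1, 2 * 1 + 1] (fun y => y) = [1, 1, 3] from by decide]
  norm_num

-- Per test case: A's loop computes B's closed form, for |x| ≤ 2^31.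
lemma ourfuncLoop_closed_form (x : Int) (hx : x ≤ 2147483648) :
    ourfuncLoop x 100 [0, 0, 0] 0 =
      if x ≤ 0 then 0 else 2 * (PySem.Int.bitLength x : Int) + 1 := by
  by_cases h0 : x ≤ 0
  · rw [if_pos h0, show (100 : Nat) = 99 + 1 from rfl, ourfuncLoop_step, if_neg]
    norm_num; omega
  · rw [if_neg h0]
    have hx1 : 0 < x := by omega
    have hkey := ourfuncLoop_key 31 1 97 3 x (by norm_num; omega) (by norm_num)
    norm_num at hkey
    rw [ourfuncLoop_init x hx1, hkey]
    split_ifs with h1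
    · ring
    · have hx1' : x = 1 := by omega
      subst hx1'
      norm_num [show PySem.Int.bitLength 1 = 1 from rfl]

-- ===== VERDICT (by name: the statement is the Claim_ definition above) =====
theorem ourfunc_spec : Claim_equal_ourfunc := by
  intro t test_cases hdom
  unfold Spec_ourfunc ourfunc ourfunc_alt
  rw [PySem.List.foldl_append_singleton_eq_map]
  simp only [List.nil_append]
  apply List.map_congr_left
  intro x hxmem
  unfold Dom_ourfunc at hdom
  simp only [Bool.and_eq_true, List.all_eq_true] at hdom
  have hx := hdom.2 x hxmem
  simp only [pvDomInt, decide_eq_true_eq] at hx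
  exact ourfuncLoop_closed_form x hx.2
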